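-- pv_equiv track=rewrite | github.com/KKimC/ProblemSolve | 백준/Platinum/2549. 루빅의 사각형/루빅의 사각형.py | move_cal2
-- ===== SOURCE A (Python) =====
-- from collections import deque
--
-- def move_cal2(graph,j):
--     arr = [graph[0][:], graph[1][:], graph[2][:], graph[3][:]]
--     q = deque([])
--     for k in range(4):
--         q.append(arr[k][j])
--     q.appendleft(q.pop())
--     q.appendleft(q.pop())
--     for k in range(4):
--         arr[k][j] = q.popleft()
--     return arr
-- ===== SOURCE B (Python) =====
-- def move_cal2(graph, j):
--     arr = [list(graph[0]), list(graph[1]), list(graph[2]), list(graph[3])]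
--     arr[0][j], arr[1][j], arr[2][j], arr[3][j] = arr[2][j], arr[3][j], arr[0][j], arr[1][j]
--     return arr
-- ===== Notes on version B (the rewrite author's own statement) =====
-- stated objective: simpler
-- what changed: Both loops and the deque are removed: the down-by-2 column rotation is written as one closed-form simultaneous index assignment on the copied rows.
import Mathlib
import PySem

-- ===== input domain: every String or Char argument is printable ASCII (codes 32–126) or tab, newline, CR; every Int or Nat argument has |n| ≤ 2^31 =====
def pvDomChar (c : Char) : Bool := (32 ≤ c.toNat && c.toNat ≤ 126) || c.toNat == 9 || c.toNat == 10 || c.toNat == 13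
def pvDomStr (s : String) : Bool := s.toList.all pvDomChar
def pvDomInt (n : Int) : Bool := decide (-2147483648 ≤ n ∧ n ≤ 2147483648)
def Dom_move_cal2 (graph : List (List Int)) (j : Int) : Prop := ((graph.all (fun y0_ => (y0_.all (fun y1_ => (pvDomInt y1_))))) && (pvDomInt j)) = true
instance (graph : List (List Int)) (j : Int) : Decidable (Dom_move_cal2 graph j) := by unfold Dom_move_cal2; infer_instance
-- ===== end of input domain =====

-- B replaces A's deque and two loops by one closed-form index-permutation assignment on the copied rows (same return value; neither mutates graph).

-- ===== PORT A =====
def move_cal2 (graph : List (List Int)) (j : Int) : List (List Int) :=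
  -- arr = [graph[0][:], graph[1][:], graph[2][:], graph[3][:]]
  let arr : List (List Int) :=
    [PySem.List.slice (PySem.List.pyGetD graph 0 []) none none,
     PySem.List.slice (PySem.List.pyGetD graph 1 []) none none,
     PySem.List.slice (PySem.List.pyGetD graph 2 []) none none,
     PySem.List.slice (PySem.List.pyGetD graph 3 []) none none]
  -- for k in range(4): q.append(arr[k][j])
  let q : List Int := (PySem.List.pyRange 0 4 1).foldl
      (fun q k => q ++ [PySem.List.pyGetD (PySem.List.pyGetD arr k []) j 0]) []
  -- q.appendleft(q.pop()) twice (deque as a list: front = head)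
  let q := q.getLastD 0 :: q.dropLast
  let q := q.getLastD 0 :: q.dropLast
  -- for k in range(4): arr[k][j] = q.popleft()
  let res := (PySem.List.pyRange 0 4 1).foldl
      (fun (s : List (List Int) × List Int) k =>
        (PySem.List.pySetD s.1 k
           (PySem.List.pySetD (PySem.List.pyGetD s.1 k []) j (s.2.headD 0)),
         s.2.tail))
      (arr, q)
  res.1

-- ===== PORT B =====
def move_cal2_alt (graph : List (List Int)) (j : Int) : List (List Int) :=
  let r0 := PySem.List.pyGetD graph 0 []
  let r1 := PySem.List.pyGetD graph 1 []
  let r2 := PySem.List.pyGetD graph 2 []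
  let r3 := PySem.List.pyGetD graph 3 []
  let a := PySem.List.pyGetD r0 j 0
  let b := PySem.List.pyGetD r1 j 0
  let c := PySem.List.pyGetD r2 j 0
  let d := PySem.List.pyGetD r3 j 0
  [PySem.List.pySetD r0 j c, PySem.List.pySetD r1 j d,
   PySem.List.pySetD r2 j a, PySem.List.pySetD r3 j b]

-- ===== PRECONDITION & SPEC =====
-- Pre_ excludes exactly the inputs where Python A raises IndexError: fewer than 4 rows, or j out of range for one of the first four rows.
def Pre_move_cal2 (graph : List (List Int)) (j : Int) : Prop :=
  4 ≤ graph.length ∧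
  PySem.Raise.InRange (PySem.List.pyGetD graph 0 []).length j ∧
  PySem.Raise.InRange (PySem.List.pyGetD graph 1 []).length j ∧
  PySem.Raise.InRange (PySem.List.pyGetD graph 2 []).length j ∧
  PySem.Raise.InRange (PySem.List.pyGetD graph 3 []).length j
instance (graph : List (List Int)) (j : Int) : Decidable (Pre_move_cal2 graph j) := by unfold Pre_move_cal2; infer_instance
def pvWitness_move_cal2 : List (List Int) × Int := ([[1], [2], [3], [4]], 0)

def Spec_move_cal2 (graph : List (List Int)) (j : Int) (out : List (List Int)) : Prop := out = move_cal2_alt graph j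
instance (graph : List (List Int)) (j : Int) (out : List (List Int)) : Decidable (Spec_move_cal2 graph j out) := by unfold Spec_move_cal2; infer_instance

-- ===== CLAIM (what is proved, stated in full; the proofs are below) =====
def Claim_equal_move_cal2 : Prop := ∀ (graph : List (List Int)) (j : Int), Dom_move_cal2 graph j → Pre_move_cal2 graph j → Spec_move_cal2 graph j (move_cal2 graph j)

-- ===== LEMMAS AND PROOFS =====

-- ===== VERDICT (by name: the statement is the Claim_ definition above) =====
theorem move_cal2_spec : Claim_equal_move_cal2 := by
  intro graph j _ hpre
  unfold Spec_move_cal2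
  obtain ⟨hlen, -⟩ := hpre
  match graph, hlen with
  | r0 :: r1 :: r2 :: r3 :: rest, _ =>
    simp only [move_cal2, move_cal2_alt]
    rw [show PySem.List.pyRange 0 4 1 = [0,1,2,3] from by decide]
    simp [List.foldl, PySem.List.pyGetD_ofNat', PySem.List.pySetD_of_nonneg,
          PySem.List.slice_none_none]
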